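-- pv_equiv track=rewrite | github.com/GeorgeKovshov/codewars2 | codewars4.py | set_reducer
-- ===== SOURCE A (Python) =====
-- def set_reducer(inp):
--     if len(inp)==1:
--         return inp[0]
--     else:
--         new_inp = []
--         last_x = -1
--         index = -1
--         for x in inp:
--             if x == last_x:
--                 new_inp[index] += 1
--             else:
--                 index += 1
--                 new_inp.append(1)
--                 last_x = x
--         return set_reducer(new_inp)
-- ===== SOURCE B (Python) =====
-- from itertools import groupby
--
-- def set_reducer(inp):
--     cur = inp
--     while len(cur) != 1:
--         cur = [sum(1 for _ in g) for _, g in groupby(cur)]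
--     return cur[0]
-- ===== Notes on version B (the rewrite author's own statement) =====
-- stated objective: simpler
-- what changed: Replaces A's tail recursion with manual index/last_x run bookkeeping by an explicit while-loop that rebuilds the list each pass via itertools.groupby group counts; Pre_ excludes the empty list (A recurses forever) and lists of length > 1 starting with -1 (A raises IndexError), on both of which A never returns.
-- outside the precondition, e.g. on set_reducer([-1, 2]): A raises IndexError, B returns 2
import Mathlib
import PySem

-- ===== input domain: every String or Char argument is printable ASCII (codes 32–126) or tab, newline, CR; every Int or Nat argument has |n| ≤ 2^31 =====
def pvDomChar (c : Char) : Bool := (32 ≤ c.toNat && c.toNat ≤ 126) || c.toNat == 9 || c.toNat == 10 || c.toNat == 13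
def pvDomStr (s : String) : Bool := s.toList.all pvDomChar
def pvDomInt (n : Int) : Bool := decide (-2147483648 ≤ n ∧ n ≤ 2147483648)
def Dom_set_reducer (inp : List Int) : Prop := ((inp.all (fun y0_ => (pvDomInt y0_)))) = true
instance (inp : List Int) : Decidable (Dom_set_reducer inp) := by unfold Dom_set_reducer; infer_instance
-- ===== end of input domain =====

-- B replaces A's tail recursion with manual index/last_x bookkeeping by an explicit
-- while-loop rebuilding the list each pass from group counts (simpler decomposition).


-- ===== PORT A =====
-- new_inp[index] += 1 (index always points at the last element on admitted inputs;
-- out of range — only reachable outside Pre_ — it is a no-op, where Python raises IndexError)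
def pvIncAt (l : List Int) (i : Int) : List Int :=
  if h : 0 ≤ i ∧ i.toNat < l.length then l.modify i.toNat (· + 1) else l

-- the for-loop body of A, state = (new_inp, last_x, index)
def pvStepA (st : List Int × Int × Int) (x : Int) : List Int × Int × Int :=
  let (new_inp, last_x, index) := st
  if x = last_x then (pvIncAt new_inp index, last_x, index)
  else (new_inp ++ [1], x, index + 1)

-- A's recursion, fueled for totality only (the fuel 2*len+1 is never exhausted on Pre_ inputs)
def set_reducer_go : Nat → List Int → Int
  | 0, inp => inp.headI
  | fuel + 1, inp =>
    if inp.length = 1 then inp.headI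
    else set_reducer_go fuel (inp.foldl pvStepA ([], -1, -1)).1

def set_reducer (inp : List Int) : Int := set_reducer_go (2 * inp.length + 1) inp

-- ===== PORT B =====
-- groupby with group counts: a pending run of value v seen c times so far
def pvRunsAux (v : Int) (c : Int) : List Int → List Int
  | [] => [c]
  | x :: xs => if x = v then pvRunsAux v (c + 1) xs else c :: pvRunsAux x 1 xs

-- one pass of B's while-body: [sum(1 for _ in g) for _, g in groupby(cur)]
def pvPassB : List Int → List Int
  | [] => []
  | x :: xs => pvRunsAux x 1 xs

-- the while-loop, fueled for totality only (same bound, never exhausted on Pre_ inputs)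
def set_reducer_alt_go : Nat → List Int → Int
  | 0, cur => cur.headI
  | fuel + 1, cur =>
    if cur.length ≠ 1 then set_reducer_alt_go fuel (pvPassB cur)
    else cur.headI

def set_reducer_alt (inp : List Int) : Int := set_reducer_alt_go (2 * inp.length + 1) inp

-- ===== PRECONDITION & SPEC =====
-- Pre_ excludes exactly the inputs where A does not return: the empty list (A recurses
-- forever) and lists of length > 1 starting with -1 (A's last_x sentinel matches and
-- new_inp[-1] on the empty accumulator raises IndexError).
def Pre_set_reducer (inp : List Int) : Prop :=
  inp ≠ [] ∧ (inp.length = 1 ∨ inp.head? ≠ some (-1))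
instance (inp : List Int) : Decidable (Pre_set_reducer inp) := by unfold Pre_set_reducer; infer_instance

def pvWitness_set_reducer : List Int := [3, 3, 5]

def Spec_set_reducer (inp : List Int) (out : Int) : Prop := out = set_reducer_alt inp
instance (inp : List Int) (out : Int) : Decidable (Spec_set_reducer inp out) := by unfold Spec_set_reducer; infer_instance

-- ===== CLAIM (what is proved, stated in full; the proofs are below) =====
def Claim_equal_set_reducer : Prop := ∀ (inp : List Int), Dom_set_reducer inp → Pre_set_reducer inp → Spec_set_reducer inp (set_reducer inp)

-- ===== LEMMAS AND PROOFS =====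

-- the fold of A's loop body, once one run is open, builds exactly the groupby counts
theorem foldA_runs (l acc : List Int) (v c : Int) :
    (l.foldl pvStepA (acc ++ [c], v, (acc.length : Int))).1 = acc ++ pvRunsAux v c l := by
  induction l generalizing acc v c with
  | nil => simp [pvRunsAux]
  | cons x xs ih =>
    by_cases hx : x = v
    · have hinc : pvIncAt (acc ++ [c]) (acc.length : Int) = acc ++ [c + 1] := by
        have hm : ∀ (a : List Int), (a ++ [c]).modify a.length (· + 1) = a ++ [c + 1] := by
          intro a; induction a with
          | nil => simp [List.modify]
          | cons y ys ihy => simpa [List.modify] using ihy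
        simp [pvIncAt, hm]
      simpa [pvStepA, hx, pvRunsAux, hinc] using ih acc v (c + 1)
    · have := ih (acc ++ [c]) x 1
      simpa [pvStepA, hx, pvRunsAux, List.append_assoc] using this

-- A's pass equals B's pass on nonempty lists not starting with -1
theorem passA_eq_passB (x : Int) (xs : List Int) (hx : x ≠ -1) :
    ((x :: xs).foldl pvStepA ([], -1, -1)).1 = pvPassB (x :: xs) := by
  have h0 : pvStepA ([], -1, -1) x = ([1], x, 0) := by
    simp [pvStepA, hx]
  have := foldA_runs xs [] x 1
  simpa [List.foldl_cons, h0, pvPassB] using this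

-- groupby counts are nonempty and start with a count ≥ 1 (by c ≥ 1 invariant)
theorem runsAux_head (l : List Int) (v c : Int) (hc : 1 ≤ c) :
    ∃ d t, pvRunsAux v c l = d :: t ∧ 1 ≤ d := by
  induction l generalizing v c with
  | nil => exact ⟨c, [], by simp [pvRunsAux], hc⟩
  | cons x xs ih =>
    by_cases hx : x = v
    · simpa [pvRunsAux, hx] using ih v (c + 1) (by omega)
    · exact ⟨c, pvRunsAux x 1 xs, by simp [pvRunsAux, hx], hc⟩

theorem passB_head (x : Int) (xs : List Int) :
    ∃ d t, pvPassB (x :: xs) = d :: t ∧ 1 ≤ d := by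
  simpa [pvPassB] using runsAux_head xs x 1 le_rfl

-- the two fueled iterations agree whenever the current list is nonempty and,
-- unless a singleton, does not start with -1
theorem go_eq (fuel : Nat) (inp : List Int) (hne : inp ≠ [])
    (hh : inp.length = 1 ∨ inp.head? ≠ some (-1)) :
    set_reducer_go fuel inp = set_reducer_alt_go fuel inp := by
  induction fuel generalizing inp with
  | zero => simp [set_reducer_go, set_reducer_alt_go]
  | succ f ih =>
    by_cases h1 : inp.length = 1
    · simp [set_reducer_go, set_reducer_alt_go, h1]
    · obtain ⟨x, xs, rfl⟩ := List.exists_cons_of_ne_nil hne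
      have hx : x ≠ -1 := by
        rcases hh with h | h
        · exact absurd h h1
        · simpa using h
      obtain ⟨d, t, hdt, hd⟩ := passB_head x xs
      have ih' := ih (pvPassB (x :: xs))
        (by simp [hdt]) (by right; simp [hdt]; omega)
      simp only [set_reducer_go, set_reducer_alt_go, h1, ne_eq]
      rw [passA_eq_passB x xs hx]
      simpa [h1] using ih'

-- ===== VERDICT (by name: the statement is the Claim_ definition above) =====
theorem set_reducer_spec : Claim_equal_set_reducer := by
  intro inp _ hpre
  unfold Spec_set_reducer set_reducer set_reducer_alt
  exact go_eq _ inp hpre.1 hpre.2
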